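-- pv_equiv track=rewrite | github.com/paralab/partition | grow/parititions_by_oversampling.py | get_ranked_values
-- ===== SOURCE A (Python) =====
-- import typing
--
-- def get_ranked_values(input_data: typing.Dict[int,int]) -> typing.Dict[int,int]:
--     vals = list(input_data.values())
--
--     vals_sorted = sorted(vals)
--     val_to_rank = {}
--
--     for rank, val in enumerate(vals_sorted):
--         val_to_rank[val] = rank
--
--     output = {}
--
--     for key in input_data:
--         output[key] =  val_to_rank[input_data[key]]
--
--     return output
-- ===== SOURCE B (Python) =====
-- def _bisect_right(a, x):
--     lo, hi = 0, len(a)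
--     while lo < hi:
--         mid = (lo + hi) // 2
--         if x < a[mid]:
--             hi = mid
--         else:
--             lo = mid + 1
--     return lo
--
-- def get_ranked_values(input_data):
--     vals_sorted = sorted(input_data.values())
--     return {k: _bisect_right(vals_sorted, v) - 1 for k, v in input_data.items()}
-- ===== Notes on version B (the rewrite author's own statement) =====
-- stated objective: alternative
-- what changed: B never builds A's value-to-rank dictionary: it keeps the sorted value array as the queried structure and finds each key's rank by binary search (bisect_right minus one), which equals A's last-occurrence rank for duplicates.
import Mathlib
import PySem

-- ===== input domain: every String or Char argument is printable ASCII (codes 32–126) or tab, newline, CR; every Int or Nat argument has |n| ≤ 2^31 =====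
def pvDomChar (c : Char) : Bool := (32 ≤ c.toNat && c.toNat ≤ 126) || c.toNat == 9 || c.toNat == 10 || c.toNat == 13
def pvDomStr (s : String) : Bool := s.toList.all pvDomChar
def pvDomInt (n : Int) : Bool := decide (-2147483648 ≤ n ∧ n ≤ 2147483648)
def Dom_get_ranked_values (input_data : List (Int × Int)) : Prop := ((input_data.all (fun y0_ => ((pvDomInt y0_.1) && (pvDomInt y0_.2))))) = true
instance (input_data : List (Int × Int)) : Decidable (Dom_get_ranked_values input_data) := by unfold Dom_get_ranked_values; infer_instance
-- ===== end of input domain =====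

-- B drops A's value→rank dictionary: it queries the sorted value array directly, finding each
-- key's rank by binary search (bisect_right − 1 = A's last-occurrence rank). Alternative, not faster.

-- ===== PORT A =====
-- val_to_rank[input_data[key]] always succeeds (the value is in vals), so getD's default is never used.
def get_ranked_values (input_data : List (Int × Int)) : List (Int × Int) :=
  let d := PySem.Dict.mk input_data
  let vals := d.values
  let vals_sorted := PySem.List.sorted vals (fun x => x) false
  let val_to_rank := (PySem.List.enumerate vals_sorted).foldl
      (fun m p => m.insert p.2 p.1) PySem.Dict.empty
  let output := d.keys.foldl
      (fun o k => o.insert k (val_to_rank.getD (d.getD k 0) 0)) PySem.Dict.empty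
  output.items

-- ===== PORT B =====
-- _bisect_right's while loop; a[mid] is always in range (mid < hi ≤ len a), so getD's default is never used.
def pvBisectRight (a : List Int) (x : Int) (lo hi : Nat) : Nat :=
  if _h : lo < hi then
    let mid := (lo + hi) / 2
    if x < a.getD mid 0 then pvBisectRight a x lo mid
    else pvBisectRight a x (mid + 1) hi
  else lo
termination_by hi - lo
decreasing_by all_goals omega

def get_ranked_values_alt (input_data : List (Int × Int)) : List (Int × Int) :=
  let d := PySem.Dict.mk input_data
  let vals_sorted := PySem.List.sorted d.values (fun x => x) false
  d.items.map (fun kv =>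
    (kv.1, (pvBisectRight vals_sorted kv.2 0 vals_sorted.length : Int) - 1))

-- ===== PRECONDITION & SPEC =====
-- Pre_ is the dict-representation invariant: the association list stands for a Python dict,
-- whose keys are necessarily distinct; a list with duplicate keys corresponds to no Python input.
def Pre_get_ranked_values (input_data : List (Int × Int)) : Prop :=
  (input_data.map Prod.fst).Nodup
instance (input_data : List (Int × Int)) : Decidable (Pre_get_ranked_values input_data) := by unfold Pre_get_ranked_values; infer_instance
def pvWitness_get_ranked_values : (List (Int × Int)) := [(1, 5), (2, 3), (3, 5)]
def Spec_get_ranked_values (input_data : List (Int × Int)) (out : List (Int × Int)) : Prop := out = get_ranked_values_alt input_data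
instance (input_data : List (Int × Int)) (out : List (Int × Int)) : Decidable (Spec_get_ranked_values input_data out) := by unfold Spec_get_ranked_values; infer_instance

-- ===== CLAIM (what is proved, stated in full; the proofs are below) =====
def Claim_equal_get_ranked_values : Prop := ∀ (input_data : List (Int × Int)), Dom_get_ranked_values input_data → Pre_get_ranked_values input_data → Spec_get_ranked_values input_data (get_ranked_values input_data)

-- ===== LEMMAS AND PROOFS =====

-- Lookup in A's rank dictionary: last sorted index of v = count(≤ v) − 1.
theorem pv_rank_lookup (s : List Int) (hs : s.Pairwise (· ≤ ·)) (i : Int)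
    (d : PySem.Dict Int Int) (v : Int) :
    ((PySem.List.enumerate s i).foldl (fun m p => m.insert p.2 p.1) d).getD v 0
      = if v ∈ s then i + (s.countP (fun w => decide (w ≤ v)) : Int) - 1 else d.getD v 0 := by
  induction s generalizing i d with
  | nil => simp [PySem.List.enumerate]
  | cons a t ih =>
    rcases List.pairwise_cons.mp hs with ⟨ha, ht⟩
    rw [PySem.List.enumerate_cons, List.foldl_cons, ih ht]
    by_cases hvt : v ∈ t
    · have hav : a ≤ v := ha v hvt
      simp only [hvt, if_true, List.mem_cons, or_true, List.countP_cons, hav]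
      simp only [decide_true, if_true]
      push_cast
      ring
    · simp only [hvt, if_false, PySem.Dict.getD_insert]
      by_cases hva : v = a
      · subst hva
        have hcnt : t.countP (fun w => decide (w ≤ v)) = 0 := by
          rw [List.countP_eq_zero]
          intro b hb hble
          exact hvt (le_antisymm (by simpa using hble) (ha b hb) ▸ hb)
        simp [hcnt]
      · simp [hva, hvt]

-- In a sorted list, an index bound r whose left part is ≤ v and right part is > v pins the count.
theorem pv_countP_char (s : List Int) (v : Int) (r : Nat) (hr : r ≤ s.length)
    (h1 : ∀ j, j < r → s.getD j 0 ≤ v)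
    (h2 : ∀ j, r ≤ j → j < s.length → v < s.getD j 0) :
    s.countP (fun w => decide (w ≤ v)) = r := by
  rw [← List.take_append_drop r s, List.countP_append]
  have htake : (s.take r).countP (fun w => decide (w ≤ v)) = (s.take r).length := by
    rw [List.countP_eq_length]
    intro w hw
    rcases List.mem_iff_getElem.mp hw with ⟨j, hj, hjw⟩
    have hjr : j < r := by simp at hj; omega
    have hjs : j < s.length := by omega
    have hg : s.getD j 0 = w := by
      rw [List.getD_eq_getElem s 0 hjs, ← hjw, List.getElem_take]
    simp only [decide_eq_true_eq]
    rw [← hg]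
    exact h1 j hjr
  have hdrop : (s.drop r).countP (fun w => decide (w ≤ v)) = 0 := by
    rw [List.countP_eq_zero]
    intro w hw
    rcases List.mem_iff_getElem.mp hw with ⟨j, hj, hjw⟩
    have hjlen : r + j < s.length := by simp at hj; omega
    have hg : s.getD (r + j) 0 = w := by
      rw [List.getD_eq_getElem s 0 hjlen, ← hjw, List.getElem_drop]
    have hv := h2 (r + j) (by omega) hjlen
    rw [hg] at hv
    simp only [decide_eq_true_eq]
    omega
  rw [htake, hdrop, List.length_take]
  omega

-- The binary search maintains the bisect_right invariant.
theorem pv_bisect_char (s : List Int) (hs : s.Pairwise (· ≤ ·)) (x : Int) :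
    ∀ (n lo hi : Nat), hi - lo ≤ n → lo ≤ hi → hi ≤ s.length →
    (∀ j, j < lo → s.getD j 0 ≤ x) →
    (∀ j, hi ≤ j → j < s.length → x < s.getD j 0) →
    pvBisectRight s x lo hi ≤ s.length ∧
      (∀ j, j < pvBisectRight s x lo hi → s.getD j 0 ≤ x) ∧
      (∀ j, pvBisectRight s x lo hi ≤ j → j < s.length → x < s.getD j 0) := by
  have hmono : ∀ (p q : Nat), p ≤ q → q < s.length → s.getD p 0 ≤ s.getD q 0 := by
    intro p q hpq hq
    rw [List.getD_eq_getElem s 0 (by omega), List.getD_eq_getElem s 0 hq]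
    rcases Nat.lt_or_ge p q with h | h
    · exact (List.pairwise_iff_getElem.mp hs) p q (by omega) hq h
    · have : p = q := by omega
      subst this; rfl
  intro n
  induction n with
  | zero =>
    intro lo hi hn hlohi hhilen hlo hhi
    have : lo = hi := by omega
    subst this
    rw [pvBisectRight, dif_neg (by omega)]
    exact ⟨by omega, hlo, hhi⟩
  | succ n ihn =>
    intro lo hi hn hlohi hhilen hlo hhi
    by_cases h : lo < hi
    · rw [pvBisectRight, dif_pos h]
      by_cases hx : x < s.getD ((lo + hi) / 2) 0
      · rw [if_pos hx]
        refine ihn lo ((lo + hi) / 2) (by omega) (by omega) (by omega) hlo ?_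
        intro j hj hjlen
        exact lt_of_lt_of_le hx (hmono _ j hj hjlen)
      · rw [if_neg hx]
        refine ihn ((lo + hi) / 2 + 1) hi (by omega) (by omega) hhilen ?_ hhi
        intro j hj
        rcases Nat.lt_or_ge j lo with hjlo | hjlo
        · exact hlo j hjlo
        · exact le_trans (hmono j ((lo + hi) / 2) (by omega) (by omega)) (not_lt.mp hx)
    · rw [pvBisectRight, dif_neg h]
      have : lo = hi := by omega
      subst this
      exact ⟨by omega, hlo, hhi⟩

-- bisect_right on a sorted list = count of elements ≤ x.
theorem pv_bisect_eq_countP (s : List Int) (hs : s.Pairwise (· ≤ ·)) (x : Int) :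
    (s.countP (fun w => decide (w ≤ x))) = pvBisectRight s x 0 s.length := by
  obtain ⟨h0, h1, h2⟩ := pv_bisect_char s hs x s.length 0 s.length (by omega) (by omega) le_rfl
    (by intro j hj; omega) (by intro j hj hjlen; omega)
  exact pv_countP_char s x _ h0 h1 h2

theorem get_ranked_values_spec : Claim_equal_get_ranked_values := by
  intro input_data _ hpre
  unfold Spec_get_ranked_values get_ranked_values get_ranked_values_alt
  simp only []
  set d := PySem.Dict.mk input_data with hd
  have hitems : d.items = input_data := rfl
  have hkeys : d.keys = input_data.map Prod.fst := rfl
  have hvals : d.values = input_data.map Prod.snd := rfl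
  have hnodup : d.keys.Nodup := by rw [hkeys]; exact hpre
  rw [hkeys, hvals]
  -- A's output loop inserts fresh distinct keys into an empty dict: items = map over keys
  rw [PySem.Dict.items_foldl_insert_fresh (k := fun k => k)
        (v := fun k => ((PySem.List.enumerate (PySem.List.sorted (input_data.map Prod.snd) (fun x => x) false)).foldl
            (fun m p => m.insert p.2 p.1) PySem.Dict.empty).getD (d.getD k 0) 0)
        _ PySem.Dict.empty (by intro a _; rfl) (by simpa using hpre)]
  simp only [PySem.Dict.empty, List.nil_append, List.map_map]
  apply List.map_congr_left
  intro kv hkv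
  have hget : d.getD kv.1 0 = kv.2 :=
    PySem.Dict.getD_of_mem_items d (by rw [hitems]; exact hkv) hnodup 0
  have hsorted : (PySem.List.sorted (input_data.map Prod.snd) (fun x => x) false).Pairwise (· ≤ ·) := by
    simpa using PySem.List.sorted_pairwise (input_data.map Prod.snd) (fun x => x)
  have hmem : kv.2 ∈ PySem.List.sorted (input_data.map Prod.snd) (fun x => x) false := by
    rw [(PySem.List.sorted_perm _ _ _).mem_iff]
    exact List.mem_map.mpr ⟨kv, hkv, rfl⟩
  simp only [Function.comp_apply, hget,
    pv_rank_lookup _ hsorted 0 _ _, hmem, if_true,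
    pv_bisect_eq_countP _ hsorted kv.2]
  norm_num

-- ===== VERDICT (by name: the statement is the Claim_ definition above) =====
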